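-- pv_equiv track=rewrite | github.com/szsen/assignment4crf | featureExtraction.py | extract_features_for_sentence1
-- ===== SOURCE A (Python) =====
-- def clean_str(s):
--     """Clean a word string so it doesn't contain special crfsuite characters"""
--     return s.replace(":","_COLON_").replace("\\", "_BACKSLASH_")
--
-- def extract_features_for_sentence1(tokens, postags):
--     N = len(tokens)
--     feats_per_position = [set() for i in range(N)]
--     for t in range(N):
--         w = clean_str(tokens[t])
--         feats_per_position[t].add("word=%s" % w)
--         feats_per_position[t].add("word.lower=%s" % w.lower()) #lowered word bc capitalization is inconsistent
--         feats_per_position[t].add("word[-2:]=%s" % w[-2:]) #neither of these increased F score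
--         feats_per_position[t].add("word[-3:]=%s" % w[-3:])
--
--         feats_per_position[t].add("word.isupper=%s" % w.isupper())
--         feats_per_position[t].add("word.istitle=%s" % w.istitle())
--         feats_per_position[t].add("word.isdigit=%s" % w.isdigit()) #didn't increase F score
--
--         #Adding in Twitter POS Tags
--         if w in postags:
--             feats_per_position[t].add("postag=" + postags[w])
--         else:
--             feats_per_position[t].add("postag=" + "#") #give random tag for unknown values
--
--         #Adding in contextual information from word behind
--         if t > 0:
--             behind = clean_str(tokens[t-1])
--             feats_per_position[t].add("behind.lower=%s" % behind.lower())
--             feats_per_position[t].add("behind.istitle=%s" % behind.istitle())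
--             feats_per_position[t].add("behind.isupper=%s" % behind.isupper())
--
--             if behind in postags:
--                 feats_per_position[t].add("behind.postag=" + postags[behind])
--             else:
--                 feats_per_position[t].add("behind.postag=" + "#")
--         elif t == 0:
--             feats_per_position[t].add("beginning") #is beginning of sentence
--
--         #Adding in contextual information from word in front
--         if t < len(tokens) - 1:
--             infront = clean_str(tokens[t + 1])
--             feats_per_position[t].add("infront.lower=%s" % infront.lower())
--             feats_per_position[t].add("infront.istitle=%s" % infront.istitle())
--             feats_per_position[t].add("infront.isupper=%s" % infront.isupper())
--
--             if infront in postags: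
--                 feats_per_position[t].add("infront.postag=" + postags[infront])
--             else:
--                 feats_per_position[t].add("infront.postag=" + "#")
--         elif t == len(tokens) - 1:
--             feats_per_position[t].add("end") #is the end of the sentence
--
--     return feats_per_position
-- ===== SOURCE B (Python) =====
-- def clean_str(s):
--     """Clean a word string so it doesn't contain special crfsuite characters"""
--     return s.replace(":", "_COLON_").replace("\\", "_BACKSLASH_")
--
--
-- def extract_features_for_sentence1(tokens, postags):
--     # Pass 1: clean every token once and precompute its profile
--     # (lowered form, istitle/isupper flags, POS tag) exactly once.
--     words = [clean_str(tok) for tok in tokens]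
--     profiles = [(w, w.lower(), "%s" % w.istitle(), "%s" % w.isupper(),
--                  postags.get(w, "#")) for w in words]
--     # Pass 2: self features per position.
--     feats = [set(["word=%s" % w,
--                   "word.lower=%s" % lw,
--                   "word[-2:]=%s" % w[-2:],
--                   "word[-3:]=%s" % w[-3:],
--                   "word.isupper=%s" % up,
--                   "word.istitle=%s" % ti,
--                   "word.isdigit=%s" % w.isdigit(),
--                   "postag=" + pt])
--              for (w, lw, ti, up, pt) in profiles]
--     # Boundary marker: position 0 is the beginning of the sentence.
--     if feats:
--         feats[0].add("beginning")
--     # Pass 3: edge pass over adjacent pairs, reusing the profiles.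
--     for t in range(len(words) - 1):
--         _, lw, ti, up, pt = profiles[t + 1]
--         feats[t].update(["infront.lower=%s" % lw,
--                          "infront.istitle=%s" % ti,
--                          "infront.isupper=%s" % up,
--                          "infront.postag=" + pt])
--         _, lw, ti, up, pt = profiles[t]
--         feats[t + 1].update(["behind.lower=%s" % lw,
--                              "behind.istitle=%s" % ti,
--                              "behind.isupper=%s" % up,
--                              "behind.postag=" + pt])
--     # Boundary marker: the last position is the end of the sentence.
--     if feats:
--         feats[-1].add("end")
--     return feats
-- ===== Notes on version B (the rewrite author's own statement) =====
-- stated objective: alternative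
-- what changed: A recomputes clean_str/lower/istitle/isupper and the POS lookup for a token at every position that sees it (self, behind, infront); B precomputes each token's profile once, builds the self-feature sets in one map, then adds the neighbour features in a single edge pass over adjacent pairs with the beginning/end boundary markers handled separately.
import Mathlib
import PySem

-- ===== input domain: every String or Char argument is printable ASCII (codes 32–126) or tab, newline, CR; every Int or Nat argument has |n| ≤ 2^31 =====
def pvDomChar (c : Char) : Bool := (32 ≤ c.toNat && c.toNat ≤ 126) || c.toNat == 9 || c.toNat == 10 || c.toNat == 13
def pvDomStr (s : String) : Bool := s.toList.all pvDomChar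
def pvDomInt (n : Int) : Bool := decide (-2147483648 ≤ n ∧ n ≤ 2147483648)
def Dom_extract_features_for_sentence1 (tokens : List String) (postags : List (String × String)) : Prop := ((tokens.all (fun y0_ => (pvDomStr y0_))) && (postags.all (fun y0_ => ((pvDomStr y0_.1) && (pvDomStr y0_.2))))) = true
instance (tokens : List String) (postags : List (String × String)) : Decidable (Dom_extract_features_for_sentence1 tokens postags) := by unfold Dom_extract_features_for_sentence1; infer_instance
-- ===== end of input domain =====

-- B replaces A's per-position neighbour branching by a profile pass (each token cleaned and
-- analysed once), an edge pass over adjacent pairs, and separate boundary markers (objective: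
-- alternative decomposition; it also avoids recomputing clean/lower/istitle/isupper/tag lookup
-- for each neighbour access).

-- ===== PORT A =====
-- shared ports of Python str built-ins that PySem does not provide (exact on the ASCII domain):
-- str.isupper(): at least one cased character and no lowercase one (ASCII cased = letters)
def pyStrIsupper (s : String) : Bool :=
  s.toList.any PySem.Chars.isupper && !(s.toList.any PySem.Chars.islower)
-- str.istitle(): CPython's scan with (previous-is-cased, seen-cased) state (ASCII: titlecase = uppercase)
def istitleGo : List Char → Bool → Bool → Bool
  | [], _, cased => cased
  | c :: rest, prev, cased =>
    if PySem.Chars.isupper c then (if prev then false else istitleGo rest true true)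
    else if PySem.Chars.islower c then (if prev then istitleGo rest true true else false)
    else istitleGo rest false cased
def pyStrIstitle (s : String) : Bool := istitleGo s.toList false false
-- '%s' % b for a bool
def pyBoolStr (b : Bool) : String := if b then "True" else "False"
-- module helper clean_str
def cleanStr (s : String) : String :=
  PySem.Str.replace (PySem.Str.replace s ":" "_COLON_") "\\" "_BACKSLASH_"

-- body of A's loop for position t (mutates feats_per_position[t]); indices t, t-1, t+1 are
-- always in range inside the branches, so Python's xs[i] is List.getD here
def featsA_step (tokens : List String) (postags : List (String × String)) (N : Nat)
    (t : Nat) (s0 : PySem.Set String) : PySem.Set String :=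
  let w := cleanStr (tokens.getD t "")
  let s := PySem.Set.add s0 ("word=" ++ w)
  let s := PySem.Set.add s ("word.lower=" ++ PySem.Str.lower w)
  let s := PySem.Set.add s ("word[-2:]=" ++ PySem.Str.slice w (some (-2)) none)
  let s := PySem.Set.add s ("word[-3:]=" ++ PySem.Str.slice w (some (-3)) none)
  let s := PySem.Set.add s ("word.isupper=" ++ pyBoolStr (pyStrIsupper w))
  let s := PySem.Set.add s ("word.istitle=" ++ pyBoolStr (pyStrIstitle w))
  let s := PySem.Set.add s ("word.isdigit=" ++ pyBoolStr (PySem.Str.strIsdigit w))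
  let s := if (PySem.Dict.mk postags).contains w then
             PySem.Set.add s ("postag=" ++ ((PySem.Dict.mk postags).get? w).getD "")
           else PySem.Set.add s ("postag=" ++ "#")
  let s :=
    if 0 < t then
      let behind := cleanStr (tokens.getD (t - 1) "")
      let s := PySem.Set.add s ("behind.lower=" ++ PySem.Str.lower behind)
      let s := PySem.Set.add s ("behind.istitle=" ++ pyBoolStr (pyStrIstitle behind))
      let s := PySem.Set.add s ("behind.isupper=" ++ pyBoolStr (pyStrIsupper behind))
      if (PySem.Dict.mk postags).contains behind then
        PySem.Set.add s ("behind.postag=" ++ ((PySem.Dict.mk postags).get? behind).getD "")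
      else PySem.Set.add s ("behind.postag=" ++ "#")
    else if t = 0 then PySem.Set.add s "beginning" else s
  let s :=
    if t < N - 1 then
      let infront := cleanStr (tokens.getD (t + 1) "")
      let s := PySem.Set.add s ("infront.lower=" ++ PySem.Str.lower infront)
      let s := PySem.Set.add s ("infront.istitle=" ++ pyBoolStr (pyStrIstitle infront))
      let s := PySem.Set.add s ("infront.isupper=" ++ pyBoolStr (pyStrIsupper infront))
      if (PySem.Dict.mk postags).contains infront then
        PySem.Set.add s ("infront.postag=" ++ ((PySem.Dict.mk postags).get? infront).getD "")
      else PySem.Set.add s ("infront.postag=" ++ "#")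
    else if t = N - 1 then PySem.Set.add s "end" else s
  s

def extract_features_for_sentence1 (tokens : List String) (postags : List (String × String)) : List (List String) :=
  let N := tokens.length
  let feats0 : List (List String) := (List.range N).map (fun _ => PySem.Set.empty)
  (List.range N).foldl (fun feats t => feats.modify t (featsA_step tokens postags N t)) feats0

-- ===== PORT B =====
-- a token's profile: (cleaned word, lower, '%s' % istitle, '%s' % isupper, tag)
def profileB (postags : List (String × String)) (w : String) :
    String × String × String × String × String :=
  (w, PySem.Str.lower w, pyBoolStr (pyStrIstitle w), pyBoolStr (pyStrIsupper w),
   PySem.Dict.getD (PySem.Dict.mk postags) w "#")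

def selfSetB (p : String × String × String × String × String) : PySem.Set String :=
  PySem.Set.ofList
    ["word=" ++ p.1, "word.lower=" ++ p.2.1,
     "word[-2:]=" ++ PySem.Str.slice p.1 (some (-2)) none,
     "word[-3:]=" ++ PySem.Str.slice p.1 (some (-3)) none,
     "word.isupper=" ++ p.2.2.2.1, "word.istitle=" ++ p.2.2.1,
     "word.isdigit=" ++ pyBoolStr (PySem.Str.strIsdigit p.1), "postag=" ++ p.2.2.2.2]

def edgeStepB (profiles : List (String × String × String × String × String))
    (feats : List (List String)) (t : Nat) : List (List String) :=
  let pr := profiles.getD (t + 1) ("", "", "", "", "#")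
  let feats := feats.modify t (fun s => PySem.Set.update s
    ["infront.lower=" ++ pr.2.1, "infront.istitle=" ++ pr.2.2.1,
     "infront.isupper=" ++ pr.2.2.2.1, "infront.postag=" ++ pr.2.2.2.2])
  let pl := profiles.getD t ("", "", "", "", "#")
  feats.modify (t + 1) (fun s => PySem.Set.update s
    ["behind.lower=" ++ pl.2.1, "behind.istitle=" ++ pl.2.2.1,
     "behind.isupper=" ++ pl.2.2.2.1, "behind.postag=" ++ pl.2.2.2.2])

def extract_features_for_sentence1_alt (tokens : List String) (postags : List (String × String)) : List (List String) :=
  let words := tokens.map cleanStr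
  let profiles := words.map (profileB postags)
  let feats := profiles.map selfSetB
  let feats := if feats.isEmpty then feats
               else feats.modify 0 (fun s => PySem.Set.add s "beginning")
  let feats := (List.range (words.length - 1)).foldl (edgeStepB profiles) feats
  if feats.isEmpty then feats
  else feats.modify (feats.length - 1) (fun s => PySem.Set.add s "end")

-- ===== PRECONDITION & SPEC =====
def Spec_extract_features_for_sentence1 (tokens : List String) (postags : List (String × String)) (out : List (List String)) : Prop := out = extract_features_for_sentence1_alt tokens postags
instance (tokens : List String) (postags : List (String × String)) (out : List (List String)) : Decidable (Spec_extract_features_for_sentence1 tokens postags out) := by unfold Spec_extract_features_for_sentence1; infer_instance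

-- ===== CLAIM (what is proved, stated in full; the proofs are below) =====
def Claim_equal_extract_features_for_sentence1 : Prop := ∀ (tokens : List String) (postags : List (String × String)), Dom_extract_features_for_sentence1 tokens postags → Spec_extract_features_for_sentence1 tokens postags (extract_features_for_sentence1 tokens postags)

-- ===== LEMMAS AND PROOFS =====

-- A's loop: each iteration modifies exactly index t
theorem foldl_modify_length {α : Type} (f : Nat → α → α) (n : Nat) (l : List α) :
    ((List.range n).foldl (fun acc t => acc.modify t (f t)) l).length = l.length := by
  induction n with
  | zero => simp
  | succ n ih => rw [List.range_succ, List.foldl_append]; simp [List.length_modify, ih]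

theorem foldl_modify_get? {α : Type} (f : Nat → α → α) (n : Nat) (l : List α)
    (i : Nat) (hi : i < l.length) :
    ((List.range n).foldl (fun acc t => acc.modify t (f t)) l)[i]?
      = some (if i < n then f i (l[i]'hi) else l[i]'hi) := by
  induction n with
  | zero => simp
  | succ n ih =>
    rw [List.range_succ, List.foldl_append]
    simp only [List.foldl_cons, List.foldl_nil]
    rw [List.getElem?_modify, ih]
    by_cases h : n = i
    · subst h; simp
    · by_cases h2 : i < n
      · simp only [Option.map_eq_map, Option.map_some]
        rw [if_neg h, if_pos h2, if_pos (by omega)]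
      · simp only [Option.map_eq_map, Option.map_some]
        rw [if_neg h, if_neg h2, if_neg (by omega)]

-- B's edge loop: edge t modifies index t (with fI t) and then index t+1 (with fB t)
theorem edge_fold_length {α : Type} (fI fB : Nat → α → α) (n : Nat) (l : List α) :
    ((List.range n).foldl (fun acc t => (acc.modify t (fI t)).modify (t + 1) (fB t)) l).length
      = l.length := by
  induction n with
  | zero => simp
  | succ n ih => rw [List.range_succ, List.foldl_append]; simp [List.length_modify, ih]

theorem edge_fold_get? {α : Type} (fI fB : Nat → α → α) (n : Nat) (l : List α)
    (i : Nat) (hi : i < l.length) :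
    ((List.range n).foldl (fun acc t => (acc.modify t (fI t)).modify (t + 1) (fB t)) l)[i]?
    = some ((if i < n then fI i else id)
        ((if 1 ≤ i ∧ i ≤ n then fB (i - 1) else id) (l[i]'hi))) := by
  induction n with
  | zero => rw [if_neg (by omega), if_neg (by omega)]; simp
  | succ n ih =>
    rw [List.range_succ, List.foldl_append]
    simp only [List.foldl_cons, List.foldl_nil]
    rw [List.getElem?_modify, List.getElem?_modify, ih]
    simp only [Option.map_eq_map, Option.map_some]
    by_cases h1 : n + 1 = i
    · subst h1
      simp only [Nat.add_sub_cancel]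
      split_ifs <;> first | rfl | omega
    · by_cases h2 : n = i
      · subst h2
        split_ifs <;> first | rfl | omega
      · split_ifs <;> first | rfl | omega

-- A's guarded dict access equals B's .get(w, "#")
theorem postag_eq (postags : List (String × String)) (w pre : String) (s : PySem.Set String) :
    (if (PySem.Dict.mk postags).contains w then
       PySem.Set.add s (pre ++ ((PySem.Dict.mk postags).get? w).getD "")
     else PySem.Set.add s (pre ++ "#"))
    = PySem.Set.add s (pre ++ PySem.Dict.getD (PySem.Dict.mk postags) w "#") := by
  rw [PySem.Dict.contains_eq_isSome_get?]
  unfold PySem.Dict.getD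
  cases (PySem.Dict.mk postags).get? w <;> simp

-- proof-only helpers: the two per-edge update functions of B's edge pass
def dfltP : String × String × String × String × String := ("", "", "", "", "#")

def fInfront (profiles : List (String × String × String × String × String)) (t : Nat) :
    List String → List String := fun s =>
  PySem.Set.update s
    ["infront.lower=" ++ (profiles.getD (t + 1) dfltP).2.1,
     "infront.istitle=" ++ (profiles.getD (t + 1) dfltP).2.2.1,
     "infront.isupper=" ++ (profiles.getD (t + 1) dfltP).2.2.2.1,
     "infront.postag=" ++ (profiles.getD (t + 1) dfltP).2.2.2.2]

def fBehind (profiles : List (String × String × String × String × String)) (t : Nat) :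
    List String → List String := fun s =>
  PySem.Set.update s
    ["behind.lower=" ++ (profiles.getD t dfltP).2.1,
     "behind.istitle=" ++ (profiles.getD t dfltP).2.2.1,
     "behind.isupper=" ++ (profiles.getD t dfltP).2.2.2.1,
     "behind.postag=" ++ (profiles.getD t dfltP).2.2.2.2]

theorem edgeStepB_eq (profiles : List (String × String × String × String × String)) :
    edgeStepB profiles
      = fun feats t => (feats.modify t (fInfront profiles t)).modify (t + 1) (fBehind profiles t) := rfl

theorem lenA (tokens : List String) (postags : List (String × String)) :
    (extract_features_for_sentence1 tokens postags).length = tokens.length := by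
  unfold extract_features_for_sentence1
  rw [foldl_modify_length]
  simp

theorem lenB (tokens : List String) (postags : List (String × String)) :
    (extract_features_for_sentence1_alt tokens postags).length = tokens.length := by
  unfold extract_features_for_sentence1_alt
  simp only [edgeStepB_eq]
  split_ifs <;>
    simp [List.length_modify, edge_fold_length]

-- the value both programs put at position i
theorem pointwise_eq (tokens : List String) (postags : List (String × String))
    (i : Nat) (hi : i < tokens.length) :
    featsA_step tokens postags tokens.length i PySem.Set.empty
      = (if tokens.length - 1 = i then (fun s => PySem.Set.add s "end") else id)
          ((if i < tokens.length - 1 then fInfront ((tokens.map cleanStr).map (profileB postags)) i else id)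
            ((if 1 ≤ i ∧ i ≤ tokens.length - 1 then fBehind ((tokens.map cleanStr).map (profileB postags)) (i - 1) else id)
              ((if 0 = i then (fun s => PySem.Set.add s "beginning") else id)
                (selfSetB (profileB postags (cleanStr (tokens[i]'hi))))))) := by
  have hprof : ∀ (j : Nat) (hj : j < tokens.length),
      ((tokens.map cleanStr).map (profileB postags)).getD j dfltP
        = profileB postags (cleanStr (tokens[j]'hj)) := by
    intro j hj
    rw [List.getD_eq_getElem _ _ (by simp [hj])]
    simp
  have htok : ∀ (j : Nat) (hj : j < tokens.length), tokens.getD j "" = tokens[j]'hj :=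
    fun j hj => List.getD_eq_getElem tokens "" hj
  simp only [featsA_step, postag_eq]
  rw [htok i hi]
  split_ifs
  all_goals try omega
  all_goals try rw [htok (i - 1) (by omega)]
  all_goals try rw [htok (i + 1) (by omega)]
  all_goals simp only [fInfront, fBehind, selfSetB, PySem.Set.update,
    PySem.Set.ofList_eq_foldl, List.foldl_cons, List.foldl_nil, id_eq, PySem.Set.empty]
  all_goals try rw [hprof (i - 1) (by omega)]
  all_goals try rw [hprof (i + 1) (by omega)]
  all_goals simp only [profileB]

theorem extract_features_for_sentence1_spec : Claim_equal_extract_features_for_sentence1 := by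
  intro tokens postags _
  unfold Spec_extract_features_for_sentence1
  apply List.ext_getElem?
  intro i
  by_cases hi : i < tokens.length
  · -- A's value at position i
    have hA : (extract_features_for_sentence1 tokens postags)[i]?
        = some (featsA_step tokens postags tokens.length i PySem.Set.empty) := by
      simp only [extract_features_for_sentence1]
      rw [foldl_modify_get? (featsA_step tokens postags tokens.length)
            tokens.length ((List.range tokens.length).map (fun _ => PySem.Set.empty)) i
            (by simp [hi])]
      rw [if_pos hi]
      rw [List.getElem_map]
    -- B's value at position i
    have htne : tokens ≠ [] := List.ne_nil_of_length_pos (by omega)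
    have hB : (extract_features_for_sentence1_alt tokens postags)[i]?
        = some ((if tokens.length - 1 = i then (fun s => PySem.Set.add s "end") else id)
            ((if i < tokens.length - 1 then fInfront ((tokens.map cleanStr).map (profileB postags)) i else id)
              ((if 1 ≤ i ∧ i ≤ tokens.length - 1 then fBehind ((tokens.map cleanStr).map (profileB postags)) (i - 1) else id)
                ((if 0 = i then (fun s => PySem.Set.add s "beginning") else id)
                  (selfSetB (profileB postags (cleanStr (tokens[i]'hi)))))))) := by
      simp only [extract_features_for_sentence1_alt, edgeStepB_eq]
      have h1 : ((((tokens.map cleanStr).map (profileB postags)).map selfSetB).isEmpty) = false := by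
        simp [htne]
      rw [h1]
      simp only [Bool.false_eq_true, if_false]
      set l1 := (((tokens.map cleanStr).map (profileB postags)).map selfSetB).modify 0
          (fun s => PySem.Set.add s "beginning") with hl1
      have hl1len : l1.length = tokens.length := by simp [hl1, List.length_modify]
      have hil1 : i < l1.length := by omega
      have hl1i : l1[i]'hil1 = (if 0 = i then (fun s => PySem.Set.add s "beginning") else id)
          (selfSetB (profileB postags (cleanStr (tokens[i]'hi)))) := by
        have := List.getElem?_modify (fun s => PySem.Set.add s "beginning") 0
          (((tokens.map cleanStr).map (profileB postags)).map selfSetB) i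
        rw [← hl1] at this
        rw [List.getElem?_eq_getElem hil1] at this
        rw [List.getElem?_eq_getElem (by simp [hi])] at this
        simp only [Option.map_eq_map, Option.map_some, Option.some.injEq] at this
        rw [this]
        split_ifs <;> simp
      simp only [List.length_map]
      set P := (tokens.map cleanStr).map (profileB postags) with hP
      set l2 := (List.range (tokens.length - 1)).foldl
          (fun feats t => (feats.modify t (fInfront P t)).modify (t + 1) (fBehind P t)) l1 with hl2
      have hfoldlen := edge_fold_length (fInfront P) (fBehind P) (tokens.length - 1) l1
      rw [← hl2] at hfoldlen
      have hfold := edge_fold_get? (fInfront P) (fBehind P) (tokens.length - 1) l1 i hil1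
      rw [← hl2] at hfold
      have hlen2 : l2.length = tokens.length := by rw [hfoldlen]; omega
      have hne2 : l2 ≠ [] := by
        intro h
        rw [h] at hlen2
        simp only [List.length_nil] at hlen2
        omega
      have h2 : l2.isEmpty = false := by simp [hne2]
      rw [h2]
      simp only [Bool.false_eq_true, if_false]
      rw [hlen2]
      rw [List.getElem?_modify, hfold]
      simp only [Option.map_eq_map, Option.map_some, Option.some.injEq]
      rw [hl1i]
      split_ifs <;> simp only [id_eq]
    rw [hA, hB]
    exact congrArg some (pointwise_eq tokens postags i hi)
  · rw [List.getElem?_eq_none (by rw [lenA]; omega),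
        List.getElem?_eq_none (by rw [lenB]; omega)]
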